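-- pv_equiv track=rewrite | github.com/barbacbd/PullRequestViewer | src/rh_pr_gather/report.py | coordinate_jira_data
-- ===== SOURCE A (Python) =====
-- def coordinate_jira_data(github_data, jira_issues):
--     """Coordinate JIRA and Github information. This will find the github pull
--     reuqests that are open for current JIRA tickets in the open/active sprint.
--
--     :param github_data: A list of lists,
--         ( user, pull request title, pull request number, pull request url, ... (labels) )
--     :param jira_issues: list of jira issue names
--
--     The following is a dictionary that will contain a list of tuples with
--     the format:
--     ( user, pull request title, pull request number, pull request url, ... (labels) )
--     Each tuple will be placed into the dictionary with the key for the repo.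
--     The data will be stored as a sheet in an excel file that is generated
--     at the conclusion of this script.
--     """
--     output = []
--     for issue in jira_issues:
--         for _, github_prs in github_data.items():
--             # do not skip on check if one is found, sometimes
--             # there are multiple cards for a single jira issue.
--             for github_pr in github_prs:
--                 if issue.lower() in github_pr[1].lower():
--                     output.append(github_pr)
--
--     return output
-- ===== SOURCE B (Python) =====
-- def coordinate_jira_data(github_data, jira_issues):
--     # Loop inversion: one pass over the PRs, lowering each title once and
--     # each issue once, bucketing matches per issue, then emitting buckets
--     # in issue order (same output order as the naive triple loop).
--     issues_low = [issue.lower() for issue in jira_issues]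
--     buckets = [[] for _ in issues_low]
--     if issues_low:
--         for prs in github_data.values():
--             for pr in prs:
--                 title = pr[1].lower()
--                 for i, il in enumerate(issues_low):
--                     if il in title:
--                         buckets[i].append(pr)
--     out = []
--     for b in buckets:
--         out.extend(b)
--     return out
-- ===== Notes on version B (the rewrite author's own statement) =====
-- stated objective: alternative
-- what changed: Inverts the loop nest: a single pass over the PRs lowercases each title once and buckets matches per (pre-lowered) issue, then concatenates buckets in issue order, instead of re-scanning and re-lowercasing every PR title for every issue.
import Mathlib
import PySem

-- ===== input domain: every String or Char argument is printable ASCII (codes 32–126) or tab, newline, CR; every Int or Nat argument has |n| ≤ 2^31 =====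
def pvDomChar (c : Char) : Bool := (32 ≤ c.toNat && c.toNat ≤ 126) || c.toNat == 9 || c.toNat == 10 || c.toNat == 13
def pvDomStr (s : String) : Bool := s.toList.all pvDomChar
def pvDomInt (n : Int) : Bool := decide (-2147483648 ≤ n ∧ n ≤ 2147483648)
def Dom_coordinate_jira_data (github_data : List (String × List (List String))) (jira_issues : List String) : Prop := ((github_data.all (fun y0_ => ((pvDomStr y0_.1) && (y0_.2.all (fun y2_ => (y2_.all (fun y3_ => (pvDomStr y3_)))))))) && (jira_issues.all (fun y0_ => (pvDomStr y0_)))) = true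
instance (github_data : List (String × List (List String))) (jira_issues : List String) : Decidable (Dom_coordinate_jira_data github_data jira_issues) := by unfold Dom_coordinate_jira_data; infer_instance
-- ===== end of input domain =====

-- B inverts the loop nest: one pass over the PRs, lowering each title/issue once, bucketing per issue; same output order.


-- ===== PORT A =====
-- triple nested loop: for issue, for repo, for pr, append if lowered issue is a substring of the lowered title (pr[1])
def coordinate_jira_data (github_data : List (String × List (List String))) (jira_issues : List String) : List (List String) :=
  jira_issues.foldl (fun output issue =>
    github_data.foldl (fun output repo =>
      repo.2.foldl (fun output github_pr =>
        if PySem.Str.isIn (PySem.Str.lower issue) (PySem.Str.lower (PySem.List.pyGetD github_pr 1 "")) then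
          output ++ [github_pr]
        else output) output) output) []

-- ===== PORT B =====
-- one pass over the PRs; each PR's lowered title is tested against every pre-lowered issue, matches go into that issue's bucket
def coordinate_jira_data_alt (github_data : List (String × List (List String))) (jira_issues : List String) : List (List String) :=
  let issues_low := jira_issues.map PySem.Str.lower
  let buckets : List (List (List String)) := issues_low.map (fun _ => [])
  let buckets :=
    if issues_low.isEmpty then buckets
    else
      github_data.foldl (fun buckets repo =>
        repo.2.foldl (fun buckets pr =>
          let title := PySem.Str.lower (PySem.List.pyGetD pr 1 "")
          (buckets.zip issues_low).map (fun bi =>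
            if PySem.Str.isIn bi.2 title then bi.1 ++ [pr] else bi.1)) buckets) buckets
  buckets.foldl (fun out b => out ++ b) []

-- ===== PRECONDITION & SPEC =====
-- Pre_ excludes exactly the inputs where A raises IndexError (some PR shorter than 2 entries is inspected, i.e. jira_issues nonempty)
def Pre_coordinate_jira_data (github_data : List (String × List (List String))) (jira_issues : List String) : Prop :=
  jira_issues ≠ [] → ∀ repo ∈ github_data, ∀ pr ∈ repo.2, 2 ≤ pr.length
instance (github_data : List (String × List (List String))) (jira_issues : List String) : Decidable (Pre_coordinate_jira_data github_data jira_issues) := by unfold Pre_coordinate_jira_data; infer_instance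

def pvWitness_coordinate_jira_data : (List (String × List (List String))) × List String :=
  ([("r", [["u", "Fix ABC-1 bug", "1"]])], ["abc-1"])

def Spec_coordinate_jira_data (github_data : List (String × List (List String))) (jira_issues : List String) (out : List (List String)) : Prop := out = coordinate_jira_data_alt github_data jira_issues
instance (github_data : List (String × List (List String))) (jira_issues : List String) (out : List (List String)) : Decidable (Spec_coordinate_jira_data github_data jira_issues out) := by unfold Spec_coordinate_jira_data; infer_instance

-- ===== CLAIM (what is proved, stated in full; the proofs are below) =====
def Claim_equal_coordinate_jira_data : Prop := ∀ (github_data : List (String × List (List String))) (jira_issues : List String), Dom_coordinate_jira_data github_data jira_issues → Pre_coordinate_jira_data github_data jira_issues → Spec_coordinate_jira_data github_data jira_issues (coordinate_jira_data github_data jira_issues)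

-- ===== LEMMAS AND PROOFS =====

-- extending an accumulator with a list of blocks appends their flattening
lemma foldl_app {a : Type} (l : List (List a)) (acc : List a) :
    l.foldl (fun out b => out ++ b) acc = acc ++ l.flatten := by
  induction l generalizing acc with
  | nil => simp
  | cons x t ih => simp [ih]

-- mapping over a list zipped with its own image
lemma zip_map_left_map {a b c : Type} (l : List a) (g : a → b) (F : b → a → c) :
    ((l.map g).zip l).map (fun bi => F bi.1 bi.2) = l.map (fun x => F (g x) x) := by
  induction l with
  | nil => rfl
  | cons x t ih => simp only [List.map_cons, List.zip_cons_cons, ih]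

-- A's two inner loops: scanning all repos appends exactly the matching PRs of the flattened PR list
lemma a_inner (gd : List (String × List (List String))) (il : String) (acc : List (List String)) :
    gd.foldl (fun output repo =>
      repo.2.foldl (fun output github_pr =>
        if PySem.Str.isIn il (PySem.Str.lower (PySem.List.pyGetD github_pr 1 "")) then
          output ++ [github_pr]
        else output) output) acc
    = acc ++ (gd.flatMap Prod.snd).filter ((fun pr => PySem.Str.isIn il (PySem.Str.lower (PySem.List.pyGetD pr 1 "")))) := by
  induction gd generalizing acc with
  | nil => simp
  | cons r t ih =>
      rw [List.foldl_cons, ih, PySem.List.foldl_append_if_eq_filter,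
        List.flatMap_cons, List.filter_append, List.append_assoc]

-- A's whole loop, as the flattening of one filtered block per issue
lemma a_eq (gd : List (String × List (List String))) (ji : List String) :
    coordinate_jira_data gd ji
    = (ji.map (fun issue =>
        (gd.flatMap Prod.snd).filter ((fun pr => PySem.Str.isIn (PySem.Str.lower issue) (PySem.Str.lower (PySem.List.pyGetD pr 1 "")))))).flatten := by
  unfold coordinate_jira_data
  suffices h : ∀ (l : List String) (acc : List (List String)),
      l.foldl (fun output issue =>
        gd.foldl (fun output repo =>
          repo.2.foldl (fun output github_pr =>
            if PySem.Str.isIn (PySem.Str.lower issue) (PySem.Str.lower (PySem.List.pyGetD github_pr 1 "")) then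
              output ++ [github_pr]
            else output) output) output) acc
      = acc ++ (l.map (fun issue =>
          (gd.flatMap Prod.snd).filter ((fun pr => PySem.Str.isIn (PySem.Str.lower issue) (PySem.Str.lower (PySem.List.pyGetD pr 1 "")))))).flatten by
    simpa using h ji []
  intro l
  induction l with
  | nil => simp
  | cons x xs ihx =>
      intro acc
      rw [List.foldl_cons, a_inner, ihx]
      simp

-- B's bucket fold over one PR list, with buckets kept as a map over the lowered issues
lemma b_prs (prs : List (List String)) (ils : List String) (g : String → List (List String)) :
    prs.foldl (fun buckets pr =>
      ((buckets.zip ils).map (fun bi =>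
        if PySem.Str.isIn bi.2 (PySem.Str.lower (PySem.List.pyGetD pr 1 "")) then bi.1 ++ [pr] else bi.1)))
      (ils.map g)
    = ils.map (fun il => g il ++ prs.filter ((fun pr => PySem.Str.isIn il (PySem.Str.lower (PySem.List.pyGetD pr 1 ""))))) := by
  induction prs generalizing g with
  | nil => simp
  | cons pr t ih =>
      rw [List.foldl_cons,
        zip_map_left_map ils g
          (fun b il => if PySem.Str.isIn il (PySem.Str.lower (PySem.List.pyGetD pr 1 "")) then b ++ [pr] else b),
        ih (fun il => if PySem.Str.isIn il (PySem.Str.lower (PySem.List.pyGetD pr 1 "")) then g il ++ [pr] else g il)]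
      apply List.map_congr_left
      intro il _
      by_cases h : PySem.Str.isIn il (PySem.Str.lower (PySem.List.pyGetD pr 1 "")) = true
      · simp only [List.filter_cons, h, if_true, List.append_assoc, List.singleton_append]
      · simp only [List.filter_cons, h, Bool.false_eq_true, if_false]

-- B's bucket fold over all repos
lemma b_repos (gd : List (String × List (List String))) (ils : List String) (g : String → List (List String)) :
    gd.foldl (fun buckets repo =>
      repo.2.foldl (fun buckets pr =>
        ((buckets.zip ils).map (fun bi =>
          if PySem.Str.isIn bi.2 (PySem.Str.lower (PySem.List.pyGetD pr 1 "")) then bi.1 ++ [pr] else bi.1))) buckets)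
      (ils.map g)
    = ils.map (fun il => g il ++ (gd.flatMap Prod.snd).filter ((fun pr => PySem.Str.isIn il (PySem.Str.lower (PySem.List.pyGetD pr 1 ""))))) := by
  induction gd generalizing g with
  | nil => simp
  | cons r t ih =>
      rw [List.foldl_cons, b_prs r.2 ils g, ih (fun il => g il ++ r.2.filter ((fun pr => PySem.Str.isIn il (PySem.Str.lower (PySem.List.pyGetD pr 1 "")))))]
      simp [List.filter_append]

-- B's whole computation, as the same flattening of per-issue blocks
lemma b_eq (gd : List (String × List (List String))) (ji : List String) :
    coordinate_jira_data_alt gd ji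
    = ((ji.map PySem.Str.lower).map (fun il =>
        (gd.flatMap Prod.snd).filter ((fun pr => PySem.Str.isIn il (PySem.Str.lower (PySem.List.pyGetD pr 1 "")))))).flatten := by
  unfold coordinate_jira_data_alt
  cases ji with
  | nil => simp
  | cons i t =>
      simp only [List.map_cons, List.isEmpty_cons, Bool.false_eq_true, if_false]
      have h := b_repos gd ((i :: t).map PySem.Str.lower) (fun _ => [])
      simp only [List.map_cons] at h
      rw [h, foldl_app]
      simp

-- ===== VERDICT (by name: the statement is the Claim_ definition above) =====
theorem coordinate_jira_data_spec : Claim_equal_coordinate_jira_data := by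
  intro gd ji _ _
  unfold Spec_coordinate_jira_data
  rw [a_eq, b_eq, List.map_map]
  rfl
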